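-- pv_equiv track=rewrite | github.com/CescWang1991/LeetCode-Python | Simulation/NowCoder/NumberOfPuts.py | numPuts
-- ===== SOURCE A (Python) =====
-- def numPuts(nums, w):
--     n = len(nums)
--     if not nums or w <= 0:
--         return 0
--     if n == 1 and nums[0] > w:
--         return 1
--     if sum(nums) <= w:
--         return 2**n
--     return numPuts(nums[1:],w)+numPuts(nums[1:], w-nums[0])
-- ===== SOURCE B (Python) =====
-- def numPuts(nums, w):
--     # Memoized recursion on (index, budget) with precomputed suffix sums,
--     # instead of the recursion on list slices.
--     n = len(nums)
--     suffix = [0] * (n + 1)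
--     for i in range(n - 1, -1, -1):
--         suffix[i] = suffix[i + 1] + nums[i]
--     memo = {}
--     def go(i, b):
--         if i == n or b <= 0:
--             return 0
--         key = (i, b)
--         if key in memo:
--             return memo[key]
--         if i == n - 1 and nums[i] > b:
--             r = 1
--         elif suffix[i] <= b:
--             r = 1 << (n - i)
--         else:
--             r = go(i + 1, b) + go(i + 1, b - nums[i])
--         memo[key] = r
--         return r
--     return go(0, w)
-- ===== Notes on version B (the rewrite author's own statement) =====
-- stated objective: alternative
-- what changed: Replaced the recursion on list slices by an index-based recursion on (index, budget) with a memo dict and precomputed suffix sums; it trades a dict and suffix array for slice copies and repeated sum() calls, and collapses repeated subproblems when budgets collide (e.g. small integer weights), though on arbitrary 32-bit weights the worst case remains exponential.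
import Mathlib
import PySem

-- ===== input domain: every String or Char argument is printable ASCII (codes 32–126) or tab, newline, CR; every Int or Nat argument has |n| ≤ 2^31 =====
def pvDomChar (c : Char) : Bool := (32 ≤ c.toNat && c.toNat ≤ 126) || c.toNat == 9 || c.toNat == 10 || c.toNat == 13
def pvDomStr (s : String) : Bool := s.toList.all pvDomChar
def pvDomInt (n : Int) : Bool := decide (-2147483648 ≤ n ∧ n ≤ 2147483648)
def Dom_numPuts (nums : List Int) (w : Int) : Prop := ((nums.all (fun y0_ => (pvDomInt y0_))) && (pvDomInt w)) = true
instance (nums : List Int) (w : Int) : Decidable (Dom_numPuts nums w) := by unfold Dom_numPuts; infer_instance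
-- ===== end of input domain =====

-- B replaces A's recursion on list slices by a memoized recursion on (index, budget) with
-- precomputed suffix sums (objective: alternative). Return values proved equal on all inputs.

-- ===== PORT A =====
def numPuts (nums : List Int) (w : Int) : Int :=
  let n := nums.length
  if nums = [] ∨ w ≤ 0 then 0
  else if n = 1 ∧ nums.headI > w then 1     -- nums[0]: list nonempty in this branch, headI is exact
  else if nums.sum ≤ w then 2 ^ n
  else numPuts nums.tail w + numPuts nums.tail (w - nums.headI)
termination_by nums.length
decreasing_by all_goals (cases nums with | nil => simp_all | cons a l => simp)

-- ===== PORT B =====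
-- the backward loop building suffix[i] = suffix[i+1] + nums[i] (ported as a foldr over nums)
def pvSuffix (nums : List Int) : List Int :=
  nums.foldr (fun x acc => (x + acc.headI) :: acc) [0]

-- the memoized recursion go(i, b); fuel is only a totality device (call uses fuel = n+1 > n - i)
def numPutsGo (nums suffix : List Int) (n : Nat) :
    Nat → Nat → Int → PySem.Dict (Nat × Int) Int → Int × PySem.Dict (Nat × Int) Int
  | 0, _, _, m => (0, m)
  | fuel+1, i, b, m =>
    if i = n ∨ b ≤ 0 then (0, m)
    else
      match m.get? (i, b) with
      | some v => (v, m)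
      | none =>
        if i = n - 1 ∧ nums.getD i 0 > b then       -- nums[i]: i < n here, getD is exact
          (1, m.insert (i, b) 1)
        else if suffix.getD i 0 ≤ b then            -- suffix[i]: i < n ≤ len suffix - 1, exact
          (2 ^ (n - i), m.insert (i, b) (2 ^ (n - i)))   -- 1 << (n-i)
        else
          let p1 := numPutsGo nums suffix n fuel (i+1) b m
          let p2 := numPutsGo nums suffix n fuel (i+1) (b - nums.getD i 0) p1.2
          (p1.1 + p2.1, p2.2.insert (i, b) (p1.1 + p2.1))

def numPuts_alt (nums : List Int) (w : Int) : Int :=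
  let n := nums.length
  (numPutsGo nums (pvSuffix nums) n (n+1) 0 w PySem.Dict.empty).1

-- ===== PRECONDITION & SPEC =====
def Spec_numPuts (nums : List Int) (w : Int) (out : Int) : Prop := out = numPuts_alt nums w
instance (nums : List Int) (w : Int) (out : Int) : Decidable (Spec_numPuts nums w out) := by unfold Spec_numPuts; infer_instance

-- ===== CLAIM (what is proved, stated in full; the proofs are below) =====
def Claim_equal_numPuts : Prop := ∀ (nums : List Int) (w : Int), Dom_numPuts nums w → Spec_numPuts nums w (numPuts nums w)

-- ===== LEMMAS AND PROOFS =====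

theorem pvSuffix_headI (nums : List Int) : (pvSuffix nums).headI = nums.sum := by
  induction nums with
  | nil => simp [pvSuffix]
  | cons a l ih => simp [pvSuffix] at ih ⊢; omega

theorem pvSuffix_getD (nums : List Int) (i : Nat) (h : i ≤ nums.length) :
    (pvSuffix nums).getD i 0 = (nums.drop i).sum := by
  induction nums generalizing i with
  | nil =>
    have : i = 0 := by simpa using h
    subst this; simp [pvSuffix]
  | cons a l ih =>
    cases i with
    | zero => simpa [pvSuffix] using congrArg (a + ·) (pvSuffix_headI l)
    | succ j =>
      have : (pvSuffix (a :: l)).getD (j+1) 0 = (pvSuffix l).getD j 0 := by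
        simp [pvSuffix]
      rw [this, ih j (by simpa using h)]
      simp

-- memo invariant: every stored value is A's answer on the corresponding suffix
def MemoGood (nums : List Int) (m : PySem.Dict (Nat × Int) Int) : Prop :=
  ∀ i b v, m.get? (i, b) = some v → v = numPuts (nums.drop i) b

theorem memoGood_insert {nums : List Int} {m : PySem.Dict (Nat × Int) Int}
    (hm : MemoGood nums m) (i : Nat) (b v : Int) (hv : v = numPuts (nums.drop i) b) :
    MemoGood nums (m.insert (i, b) v) := by
  intro i' b' v' h
  rw [PySem.Dict.get?_insert] at h
  split at h
  · rename_i heq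
    obtain ⟨h1, h2⟩ := Prod.mk.injEq .. ▸ heq
    cases h; subst h1 h2; exact hv
  · exact hm _ _ _ h

theorem numPutsGo_correct (nums : List Int) :
    ∀ (fuel i : Nat) (b : Int) (m : PySem.Dict (Nat × Int) Int),
    i ≤ nums.length → nums.length - i < fuel → MemoGood nums m →
    (numPutsGo nums (pvSuffix nums) nums.length fuel i b m).1 = numPuts (nums.drop i) b ∧
    MemoGood nums (numPutsGo nums (pvSuffix nums) nums.length fuel i b m).2 := by
  intro fuel
  induction fuel with
  | zero => intro i b m _ hf _; omega
  | succ fuel ih =>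
    intro i b m hi hf hm
    rw [numPutsGo]
    by_cases h0 : i = nums.length ∨ b ≤ 0
    · simp only [h0, if_true]
      constructor
      · rw [numPuts]
        rcases h0 with h0 | h0
        · subst h0; simp
        · simp [h0]
      · exact hm
    · simp only [h0, if_false]
      push_neg at h0
      obtain ⟨hne, hbpos⟩ := h0
      have hilt : i < nums.length := lt_of_le_of_ne hi hne
      cases hget : m.get? (i, b) with
      | some v =>
        simp only []
        exact ⟨hm _ _ _ hget, hm⟩
      | none =>
        simp only []
        have hdrop : nums.drop i = nums[i] :: nums.drop (i+1) :=
          List.drop_eq_getElem_cons hilt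
        have hgetD : nums.getD i 0 = nums[i] := List.getD_eq_getElem nums 0 hilt
        have hlen : (nums.drop i).length = nums.length - i := List.length_drop ..
        have hsum : (pvSuffix nums).getD i 0 = (nums.drop i).sum := pvSuffix_getD nums i hi
        -- rewrite A once on the suffix
        have hA : numPuts (nums.drop i) b =
            if (nums.drop i).length = 1 ∧ (nums.drop i).headI > b then 1
            else if (nums.drop i).sum ≤ b then 2 ^ (nums.drop i).length
            else numPuts (nums.drop i).tail b + numPuts (nums.drop i).tail (b - (nums.drop i).headI) := by
          rw [numPuts]
          have : ¬(nums.drop i = [] ∨ b ≤ 0) := by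
            push_neg
            exact ⟨hdrop ▸ List.cons_ne_nil _ _, hbpos⟩
          simp only [this, if_false]
        have hhead : (nums.drop i).headI = nums[i] := by rw [hdrop]; rfl
        have htail : (nums.drop i).tail = nums.drop (i+1) := by rw [hdrop]; rfl
        have hc1 : (i = nums.length - 1 ∧ nums.getD i 0 > b) ↔
            ((nums.drop i).length = 1 ∧ (nums.drop i).headI > b) := by
          rw [hgetD, hhead, hlen]
          constructor
          · rintro ⟨h1, h2⟩; exact ⟨by omega, h2⟩
          · rintro ⟨h1, h2⟩; exact ⟨by omega, h2⟩
        by_cases hb1 : i = nums.length - 1 ∧ nums.getD i 0 > b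
        · rw [if_pos hb1]
          have hv : (1 : Int) = numPuts (nums.drop i) b := by
            rw [hA, if_pos (hc1.mp hb1)]
          exact ⟨hv, memoGood_insert hm i b 1 hv⟩
        · rw [if_neg hb1]
          by_cases hb2 : (pvSuffix nums).getD i 0 ≤ b
          · rw [if_pos hb2]
            have hval : numPuts (nums.drop i) b = 2 ^ (nums.length - i) := by
              rw [hA, if_neg (by rw [← hc1]; exact hb1), if_pos (hsum ▸ hb2), hlen]
            exact ⟨hval.symm, memoGood_insert hm i b _ hval.symm⟩
          · rw [if_neg hb2]
            have hi1 : i + 1 ≤ nums.length := hilt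
            have hf1 : nums.length - (i+1) < fuel := by omega
            obtain ⟨he1, hg1⟩ := ih (i+1) b m hi1 hf1 hm
            obtain ⟨he2, hg2⟩ := ih (i+1) (b - nums.getD i 0) _ hi1 hf1 hg1
            have hval : numPuts (nums.drop i) b =
                numPuts (nums.drop (i+1)) b + numPuts (nums.drop (i+1)) (b - nums.getD i 0) := by
              rw [hA, if_neg (by rw [← hc1]; exact hb1), if_neg (hsum ▸ hb2), htail, hhead, hgetD]
            simp only []
            have hv : (numPutsGo nums (pvSuffix nums) nums.length fuel (i+1) b m).1 +
                (numPutsGo nums (pvSuffix nums) nums.length fuel (i+1) (b - nums.getD i 0)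
                  (numPutsGo nums (pvSuffix nums) nums.length fuel (i+1) b m).2).1 =
                numPuts (nums.drop i) b := by
              rw [he1, he2, ← hval]
            exact ⟨hv, memoGood_insert hg2 i b _ hv⟩

-- ===== VERDICT (by name: the statement is the Claim_ definition above) =====
theorem numPuts_spec : Claim_equal_numPuts := by
  intro nums w _
  unfold Spec_numPuts numPuts_alt
  have h := (numPutsGo_correct nums (nums.length + 1) 0 w PySem.Dict.empty
    (Nat.zero_le _) (by omega) (by intro i b v h; simp [PySem.Dict.get?_empty] at h)).1
  simp only [] at h ⊢
  rw [h]
  simp
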